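-- pv_equiv track=rewrite | github.com/tdslivensky/AlgorithmsAndDataStructures | Algorithms on Strings/Programming-Assignment-1/trie_matching_extended.py | Solve
-- ===== SOURCE A (Python) =====
-- class Vertex:
--     def __init__(self, symbol):
--         self.next = []
--         self.patternEnd = False
--         self.symbol = symbol
--
-- def Solve(text, n, patterns):
--     result = []
--     trie = BuildTrie(patterns)
--     t = text
--     count = 0
--     while len(t) != 0:
--         curr = Match(t, trie)
--         if curr == True:
--             result.append(count)
--         count += 1
--         t = t[1:]
--     return result
--
-- def BuildTrie(patterns):
--     trie = []
--     currentVertex = Vertex('root')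
--     trie.append(currentVertex)
--     count = 0
--
--     for p in patterns:
--         index = 0
--         currentVertex = trie[0]
--         eva = False
--         for i in range(len(p)):
--             currentSymbol = p[i]
--             for n in currentVertex.next:
--                 if currentSymbol == trie[n].symbol:
--                     index = n
--                     currentVertex = trie[index]
--                     eva = True
--                     if (i+1) == len(p):
--                         trie[index].patternEnd = True
--             if eva == False:
--                 count += 1
--                 add = Vertex(currentSymbol)
--                 trie.append(add)
--                 trie[index].next.append(count)
--                 index = count
--                 currentVertex = trie[count]
--             eva = False
--         trie[count].patternEnd = True
--     return trie
--
-- def Match(text, trie):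
--     index = 0
--     currentSymbol = text[index]
--     currentNode = trie[index]
--     a = 0
--     eva = False
--     while a < len(text):
--         for n in currentNode.next:
--             if currentSymbol == trie[n].symbol:
--                 if len(trie[n].next) == 0 or trie[n].patternEnd == True:
--                     return True
--                 else:
--                     index += 1
--                     currentNode = trie[n]
--                     currentSymbol = "-1" if len(text) == index else text[index]
--                     eva = True
--                     break
--         if eva == False:
--             return False
--         a += 1
--         eva = False
--     return False
-- ===== SOURCE B (Python) =====
-- def Solve(text, n, patterns):
--     return [i for i in range(len(text))
--             if any(p and text.startswith(p, i) for p in patterns)]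
-- ===== Notes on version B (the rewrite author's own statement) =====
-- stated objective: simpler
-- what changed: Drops the trie (BuildTrie/Match/Vertex) entirely: B tests each text position directly for a non-empty pattern occurring as a prefix there, one comprehension instead of build-an-index-then-walk.
import Mathlib
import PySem

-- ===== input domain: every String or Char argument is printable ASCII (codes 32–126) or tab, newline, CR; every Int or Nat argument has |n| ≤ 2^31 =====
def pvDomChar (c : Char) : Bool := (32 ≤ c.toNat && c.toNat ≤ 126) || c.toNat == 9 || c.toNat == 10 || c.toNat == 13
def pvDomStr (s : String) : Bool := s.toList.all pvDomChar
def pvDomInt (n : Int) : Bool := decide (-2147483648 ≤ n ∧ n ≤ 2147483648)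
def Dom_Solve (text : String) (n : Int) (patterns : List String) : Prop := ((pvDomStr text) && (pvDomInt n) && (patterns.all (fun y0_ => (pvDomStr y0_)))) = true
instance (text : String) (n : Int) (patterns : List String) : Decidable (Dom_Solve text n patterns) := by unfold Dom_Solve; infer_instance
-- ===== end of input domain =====

-- B drops the trie (BuildTrie/Match/Vertex) and tests each position directly for a
-- non-empty pattern occurring as a prefix there: simpler, no index construction.

-- ===== PORT A =====
-- Vertex: next / patternEnd / symbol (symbol "root" for the root, else a 1-char string)
structure PVVertex where
  nxt : List Nat
  fin : Bool
  sym : String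
deriving DecidableEq, Repr

def pvDefV : PVVertex := ⟨[], false, "root"⟩

def pvNxt (T : List PVVertex) (i : Nat) : List Nat := (T.getD i pvDefV).nxt
def pvSym (T : List PVVertex) (i : Nat) : String := (T.getD i pvDefV).sym
def pvFin (T : List PVVertex) (i : Nat) : Bool := (T.getD i pvDefV).fin

-- trie[i].patternEnd = True
def pvSetEnd (T : List PVVertex) (i : Nat) : List PVVertex :=
  T.set i { T.getD i pvDefV with fin := true }

-- trie[i].next.append(k)
def pvAddNext (T : List PVVertex) (i : Nat) (k : Nat) : List PVVertex :=
  T.set i { T.getD i pvDefV with nxt := (T.getD i pvDefV).nxt ++ [k] }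

-- BuildTrie: body of "for n in currentVertex.next" (mark = "(i+1)==len(p)");
-- state = (trie, index, currentVertex-as-index, eva)
def pvBStep (mark : Bool) (c : String) (s2 : List PVVertex × Nat × Nat × Bool) (nn : Nat) :
    List PVVertex × Nat × Nat × Bool :=
  let (T, index, curr, eva) := s2
  if c == pvSym T nn then
    let index := nn
    let curr := index
    let T := if mark then pvSetEnd T index else T
    (T, index, curr, true)
  else (T, index, curr, eva)

-- BuildTrie: body of "for i in range(len(p))"; state = (trie, count, index, currentVertex-as-index)
def pvIStep (cs : List Char) (st : List PVVertex × Nat × Nat × Nat) (i : Nat) :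
    List PVVertex × Nat × Nat × Nat :=
  let (T, count, index, curr) := st
  let c := String.singleton (cs.getD i ' ')   -- p[i], i always in range
  let r := (pvNxt T curr).foldl (pvBStep (i + 1 == cs.length) c) (T, index, curr, false)
  let T := r.1
  let index := r.2.1
  let curr := r.2.2.1
  let eva := r.2.2.2
  if eva = false then
    let count := count + 1
    let T := T ++ [⟨[], false, c⟩]            -- trie.append(Vertex(currentSymbol))
    let T := pvAddNext T index count          -- trie[index].next.append(count)
    (T, count, count, count)
  else (T, count, index, curr)

-- BuildTrie: body of "for p in patterns" plus the trailing "trie[count].patternEnd = True"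
def pvInsert (st : List PVVertex × Nat) (p : String) : List PVVertex × Nat :=
  let (T, count) := st
  let r := (List.range p.toList.length).foldl (pvIStep p.toList) (T, count, 0, 0)
  (pvSetEnd r.1 r.2.1, r.2.1)

def pvBuildTrie (patterns : List String) : List PVVertex :=
  (patterns.foldl pvInsert ([pvDefV], 0)).1

-- Match: the "for n in currentNode.next" scan: none = no symbol match (eva stays False),
-- some none = "return True", some (some nn) = matched, continue from nn
def pvScan (T : List PVVertex) (c : String) : List Nat → Option (Option Nat)
  | [] => none
  | nn :: ns =>
    if c == pvSym T nn then
      if (pvNxt T nn).length == 0 || pvFin T nn then some none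
      else some (some nn)
    else pvScan T c ns

-- Match: "while a < len(text)" — fuel = len(text) - a
def pvMatchLoop (t : List Char) (T : List PVVertex) : Nat → Nat → Nat → String → Bool
  | 0, _, _, _ => false
  | fuel + 1, index, node, c =>
    match pvScan T c (pvNxt T node) with
    | none => false
    | some none => true
    | some (some nn) =>
      let index := index + 1
      let c := if t.length == index then "-1" else String.singleton (t.getD index ' ')
      pvMatchLoop t T fuel index nn c

def pvMatch (t : List Char) (T : List PVVertex) : Bool :=
  pvMatchLoop t T t.length 0 0 (String.singleton (t.getD 0 ' '))

-- Solve: "while len(t) != 0" over successive suffixes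
def pvSolveLoop (T : List PVVertex) : List Char → Int → List Int
  | [], _ => []
  | c :: t, count =>
    (if pvMatch (c :: t) T then [count] else []) ++ pvSolveLoop T t (count + 1)

def Solve (text : String) (n : Int) (patterns : List String) : List Int :=
  pvSolveLoop (pvBuildTrie patterns) text.toList 0

-- ===== PORT B =====
-- [i for i in range(len(text)) if any(p and text.startswith(p, i) for p in patterns)]
-- (text.startswith(p, i) with 0 ≤ i ≤ len(text) is exactly p.toList <+: (text.toList.drop i))
def Solve_alt (text : String) (n : Int) (patterns : List String) : List Int :=
  ((List.range text.toList.length).filter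
      (fun i => patterns.any (fun p => decide (p ≠ "") && p.toList.isPrefixOf (text.toList.drop i)))).map
    (fun i => (i : Int))

-- ===== PRECONDITION & SPEC =====
def Spec_Solve (text : String) (n : Int) (patterns : List String) (out : List Int) : Prop := out = Solve_alt text n patterns
instance (text : String) (n : Int) (patterns : List String) (out : List Int) : Decidable (Spec_Solve text n patterns out) := by unfold Spec_Solve; infer_instance

-- ===== CLAIM (what is proved, stated in full; the proofs are below) =====
def Claim_equal_Solve : Prop := ∀ (text : String) (n : Int) (patterns : List String), Dom_Solve text n patterns → Spec_Solve text n patterns (Solve text n patterns)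

-- ===== LEMMAS AND PROOFS =====

-- ---------- basic accessors under updates ----------

theorem pvLen_setEnd (T : List PVVertex) (i : Nat) : (pvSetEnd T i).length = T.length := by
  simp [pvSetEnd]

theorem pvGetD_setEnd (T : List PVVertex) (i j : Nat) :
    ((pvSetEnd T i).getD j pvDefV) =
      if i = j ∧ i < T.length then { T.getD i pvDefV with fin := true } else T.getD j pvDefV := by
  unfold pvSetEnd
  by_cases hlt : i < T.length
  · by_cases hij : i = j
    · subst hij; simp [List.getD, List.getElem?_set_self, hlt]
    · simp [List.getD, List.getElem?_set_ne hij, hij]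
  · rw [List.set_eq_of_length_le (by omega)]
    simp [hlt]

theorem pvNxt_setEnd (T : List PVVertex) (i j : Nat) : pvNxt (pvSetEnd T i) j = pvNxt T j := by
  unfold pvNxt; rw [pvGetD_setEnd]; split <;> simp_all

theorem pvSym_setEnd (T : List PVVertex) (i j : Nat) : pvSym (pvSetEnd T i) j = pvSym T j := by
  unfold pvSym; rw [pvGetD_setEnd]; split <;> simp_all

theorem pvFin_setEnd (T : List PVVertex) (i j : Nat) :
    pvFin (pvSetEnd T i) j = if i = j ∧ i < T.length then true else pvFin T j := by
  unfold pvFin; rw [pvGetD_setEnd]; split <;> simp_all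

theorem pvSetEnd_idem (T : List PVVertex) (i : Nat) :
    pvSetEnd (pvSetEnd T i) i = pvSetEnd T i := by
  apply List.ext_getElem?
  intro n
  unfold pvSetEnd
  by_cases hlt : i < T.length
  · simp only [List.getElem?_set, List.length_set, List.getD]
    by_cases hin : i = n
    · subst hin; simp [hlt]
    · simp [hin]
  · rw [List.set_eq_of_length_le (by simp; omega)]

-- the trie after "append new vertex; link it from v": all three accessors
theorem pvLen_ins (T : List PVVertex) (v k : Nat) (c : String) :
    (pvAddNext (T ++ [⟨[], false, c⟩]) v k).length = T.length + 1 := by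
  simp [pvAddNext]

theorem pvNxt_ins (T : List PVVertex) (v k w : Nat) (c : String) (hv : v < T.length) :
    pvNxt (pvAddNext (T ++ [⟨[], false, c⟩]) v k) w =
      if w = v then pvNxt T v ++ [k] else if w = T.length then [] else pvNxt T w := by
  unfold pvAddNext pvNxt
  have hgv : (T ++ [(⟨[], false, c⟩ : PVVertex)]).getD v pvDefV = T.getD v pvDefV := by
    simp [List.getD, List.getElem?_append_left hv]
  by_cases hwv : w = v
  · subst hwv
    rw [List.getD, List.getElem?_set_self (by simp; omega)]
    simp [hgv, List.getD, List.getElem?_append_left hv]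
  · rw [List.getD, List.getElem?_set_ne (by omega)]
    by_cases hwT : w = T.length
    · subst hwT; simp [List.getD, hwv]
    · by_cases hlt : w < T.length
      · simp [List.getD, List.getElem?_append_left hlt, hwv, hwT]
      · have : (T ++ [(⟨[], false, c⟩ : PVVertex)])[w]? = none := by
          rw [List.getElem?_eq_none] <;> simp <;> omega
        have h2 : T[w]? = none := by rw [List.getElem?_eq_none]; omega
        simp [List.getD, this, h2, hwv, hwT, pvDefV]

theorem pvGetD_ins_aux (T : List PVVertex) (v k w : Nat) (c : String) (hv : v < T.length) :
    ((pvAddNext (T ++ [⟨[], false, c⟩]) v k).getD w pvDefV).sym =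
        (if w = T.length then c else pvSym T w) ∧
      ((pvAddNext (T ++ [⟨[], false, c⟩]) v k).getD w pvDefV).fin =
        (if w = T.length then false else pvFin T w) := by
  unfold pvAddNext pvSym pvFin
  have hgv : (T ++ [(⟨[], false, c⟩ : PVVertex)]).getD v pvDefV = T.getD v pvDefV := by
    simp [List.getD, List.getElem?_append_left hv]
  by_cases hwv : w = v
  · subst hwv
    rw [List.getD, List.getElem?_set_self (by simp; omega)]
    have hne : w ≠ T.length := by omega
    simp [hne, List.getElem?_append_left hv]
  · rw [List.getD, List.getElem?_set_ne (by omega)]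
    by_cases hwT : w = T.length
    · subst hwT; simp [List.getD]
    · by_cases hlt : w < T.length
      · simp [List.getD, List.getElem?_append_left hlt, hwT]
      · have h1 : (T ++ [(⟨[], false, c⟩ : PVVertex)])[w]? = none := by
          rw [List.getElem?_eq_none] <;> simp <;> omega
        have h2 : T[w]? = none := by rw [List.getElem?_eq_none]; omega
        simp [List.getD, h1, h2, hwT, pvDefV]

theorem pvSym_ins (T : List PVVertex) (v k w : Nat) (c : String) (hv : v < T.length) :
    pvSym (pvAddNext (T ++ [⟨[], false, c⟩]) v k) w =
      if w = T.length then c else pvSym T w := by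
  exact (pvGetD_ins_aux T v k w c hv).1

theorem pvFin_ins (T : List PVVertex) (v k w : Nat) (c : String) (hv : v < T.length) :
    pvFin (pvAddNext (T ++ [⟨[], false, c⟩]) v k) w =
      if w = T.length then false else pvFin T w := by
  exact (pvGetD_ins_aux T v k w c hv).2



-- ---------- the trie invariant ----------
-- π maps each trie index to its path from the root; Q is the list of (char-lists of the)
-- patterns inserted so far (empty patterns included in Q but invisible to every field).

def PathQ (Q : List (List Char)) (s : List Char) : Prop :=
  s = [] ∨ ∃ q ∈ Q, s ≠ [] ∧ s <+: q

structure TInv (T : List PVVertex) (pi : List (List Char × Nat)) (Q : List (List Char)) : Prop where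
  root : ([], 0) ∈ pi
  keys : ∀ s v, (s, v) ∈ pi → v < T.length ∧ PathQ Q s
  cover : ∀ s q, q ∈ Q → s <+: q → s ≠ [] → ∃ v, (s, v) ∈ pi
  inj : ∀ s₁ s₂ v, (s₁, v) ∈ pi → (s₂, v) ∈ pi → s₁ = s₂
  func : ∀ s v₁ v₂, (s, v₁) ∈ pi → (s, v₂) ∈ pi → v₁ = v₂
  edge : ∀ s v u, (s, v) ∈ pi → (u ∈ pvNxt T v ↔ ∃ c, (s ++ [c], u) ∈ pi)
  symm : ∀ s c v, (s ++ [c], v) ∈ pi → pvSym T v = String.singleton c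
  fin_iff : ∀ s v, (s, v) ∈ pi → s ≠ [] → (pvFin T v = true ↔ s ∈ Q)
  leaf : ∀ s v, (s, v) ∈ pi → s ≠ [] → pvNxt T v = [] → pvFin T v = true
  last : 1 < T.length → pvFin T (T.length - 1) = true

-- mid-insertion invariant: the chain for pattern cs has been built up to its first i
-- characters; the tip (index T.length - 1) is the freshly appended, not yet end-marked node
structure CInv (T : List PVVertex) (pi : List (List Char × Nat)) (Q : List (List Char))
    (cs : List Char) (i : Nat) : Prop where
  hipos : 0 < i
  hile : i ≤ cs.length
  root : ([], 0) ∈ pi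
  keys : ∀ s v, (s, v) ∈ pi → v < T.length ∧ (PathQ Q s ∨ (s ≠ [] ∧ s <+: cs ∧ s.length ≤ i))
  cover : ∀ s q, q ∈ Q → s <+: q → s ≠ [] → ∃ v, (s, v) ∈ pi
  cover2 : ∀ j, 0 < j → j ≤ i → ∃ v, (cs.take j, v) ∈ pi
  inj : ∀ s₁ s₂ v, (s₁, v) ∈ pi → (s₂, v) ∈ pi → s₁ = s₂
  func : ∀ s v₁ v₂, (s, v₁) ∈ pi → (s, v₂) ∈ pi → v₁ = v₂
  edge : ∀ s v u, (s, v) ∈ pi → (u ∈ pvNxt T v ↔ ∃ c, (s ++ [c], u) ∈ pi)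
  symm : ∀ s c v, (s ++ [c], v) ∈ pi → pvSym T v = String.singleton c
  fin_iff : ∀ s v, (s, v) ∈ pi → s ≠ [] → (pvFin T v = true ↔ s ∈ Q)
  leaf : ∀ s v, (s, v) ∈ pi → s ≠ [] → v ≠ T.length - 1 → pvNxt T v = [] → pvFin T v = true
  tip : (cs.take i, T.length - 1) ∈ pi
  tipnxt : pvNxt T (T.length - 1) = []
  tiplen : 1 < T.length
  notdom : ∀ q ∈ Q, ¬ cs.take i <+: q

theorem singleton_inj {c c' : Char} (h : String.singleton c = String.singleton c') : c = c' := by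
  have := congrArg String.toList h
  simpa [String.singleton] using this

-- ---------- the two inner scans, under a "unique matching child" hypothesis ----------

theorem pvBStep_no (mark : Bool) (c : String) (T : List PVVertex) (i0 c0 : Nat) (e : Bool)
    (w : Nat) (h : pvSym T w ≠ c) : pvBStep mark c (T, i0, c0, e) w = (T, i0, c0, e) := by
  have hb : (c == pvSym T w) = false := by
    simp only [beq_eq_false_iff_ne, ne_eq]
    exact fun hc => h hc.symm
  simp [pvBStep, hb]

theorem pvBStep_yes (mark : Bool) (c : String) (T : List PVVertex) (i0 c0 : Nat) (e : Bool)
    (w : Nat) (h : pvSym T w = c) :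
    pvBStep mark c (T, i0, c0, e) w = ((if mark then pvSetEnd T w else T), w, w, true) := by
  simp [pvBStep, h]

theorem bfold_skip (mark : Bool) (c : String) (T : List PVVertex) (i0 c0 : Nat) (e : Bool)
    (ns : List Nat) (h : ∀ w ∈ ns, pvSym T w ≠ c) :
    ns.foldl (pvBStep mark c) (T, i0, c0, e) = (T, i0, c0, e) := by
  induction ns with
  | nil => rfl
  | cons w ns ih =>
    rw [List.foldl_cons, pvBStep_no mark c T i0 c0 e w (h w (by simp))]
    exact ih (fun w hww => h w (by simp [hww]))

theorem bfold_stay (mark : Bool) (c : String) (T' : List PVVertex) (u : Nat)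
    (ns : List Nat) (huni : ∀ w ∈ ns, pvSym T' w = c → w = u)
    (hfix : (if mark then pvSetEnd T' u else T') = T') :
    ns.foldl (pvBStep mark c) (T', u, u, true) = (T', u, u, true) := by
  induction ns with
  | nil => rfl
  | cons w ns ih =>
    by_cases hw : pvSym T' w = c
    · have hwu : w = u := huni w (by simp) hw
      subst hwu
      rw [List.foldl_cons, pvBStep_yes _ _ _ _ _ _ _ hw, hfix]
      exact ih (fun w hww => huni w (by simp [hww]))
    · rw [List.foldl_cons, pvBStep_no mark c T' u u true w hw]
      exact ih (fun w hww => huni w (by simp [hww]))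

theorem bfold_found (mark : Bool) (c : String) (T : List PVVertex) (i0 c0 u : Nat)
    (ns : List Nat) (hu : u ∈ ns) (hsu : pvSym T u = c)
    (huni : ∀ w ∈ ns, pvSym T w = c → w = u) :
    ns.foldl (pvBStep mark c) (T, i0, c0, false) =
      ((if mark then pvSetEnd T u else T), u, u, true) := by
  induction ns with
  | nil => cases hu
  | cons w ns ih =>
    by_cases hw : pvSym T w = c
    · have hwu : w = u := huni w (by simp) hw
      subst hwu
      rw [List.foldl_cons, pvBStep_yes _ _ _ _ _ _ _ hw]
      refine bfold_stay mark c _ w ns ?_ ?_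
      · intro w' hww hsym
        apply huni w' (by simp [hww])
        split at hsym
        · rwa [pvSym_setEnd] at hsym
        · exact hsym
      · split
        · exact pvSetEnd_idem T w
        · rfl
    · have hwne : w ≠ u := fun h => hw (h ▸ hsu)
      have hu' : u ∈ ns := by
        rcases List.mem_cons.mp hu with h | h
        · exact absurd h.symm hwne
        · exact h
      rw [List.foldl_cons, pvBStep_no mark c T i0 c0 false w hw]
      exact ih hu' (fun w hww => huni w (by simp [hww]))

theorem scan_cons_no (c : String) (T : List PVVertex) (w : Nat) (ns : List Nat)
    (h : pvSym T w ≠ c) : pvScan T c (w :: ns) = pvScan T c ns := by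
  have hb : (c == pvSym T w) = false := by
    simp only [beq_eq_false_iff_ne, ne_eq]
    exact fun hc => h hc.symm
  simp [pvScan, hb]

theorem scan_none (c : String) (T : List PVVertex) (ns : List Nat)
    (h : ∀ w ∈ ns, pvSym T w ≠ c) : pvScan T c ns = none := by
  induction ns with
  | nil => rfl
  | cons w ns ih =>
    rw [scan_cons_no c T w ns (h w (by simp))]
    exact ih (fun w hww => h w (by simp [hww]))

theorem scan_found (c : String) (T : List PVVertex) (u : Nat) (ns : List Nat)
    (hu : u ∈ ns) (hsu : pvSym T u = c) (huni : ∀ w ∈ ns, pvSym T w = c → w = u) :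
    pvScan T c ns = if (pvNxt T u).length == 0 || pvFin T u then some none else some (some u) := by
  induction ns with
  | nil => cases hu
  | cons w ns ih =>
    by_cases hw : pvSym T w = c
    · have hwu : w = u := huni w (by simp) hw
      subst hwu
      simp [pvScan, hw]
    · have hwne : w ≠ u := fun h => hw (h ▸ hsu)
      have hu' : u ∈ ns := by
        rcases List.mem_cons.mp hu with h | h
        · exact absurd h.symm hwne
        · exact h
      rw [scan_cons_no c T w ns hw]
      exact ih hu' (fun w hww => huni w (by simp [hww]))

-- ---------- child lookup facts from the invariant fields ----------

theorem child_unique {pi : List (List Char × Nat)} {T : List PVVertex}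
    (hfunc : ∀ s v₁ v₂, (s, v₁) ∈ pi → (s, v₂) ∈ pi → v₁ = v₂)
    (hedge : ∀ s v u, (s, v) ∈ pi → (u ∈ pvNxt T v ↔ ∃ c, (s ++ [c], u) ∈ pi))
    (hsymm : ∀ s c v, (s ++ [c], v) ∈ pi → pvSym T v = String.singleton c)
    {s : List Char} {v u : Nat} {c : Char}
    (hs : (s, v) ∈ pi) (hu : (s ++ [c], u) ∈ pi) :
    u ∈ pvNxt T v ∧ pvSym T u = String.singleton c ∧
      ∀ w ∈ pvNxt T v, pvSym T w = String.singleton c → w = u := by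
  refine ⟨(hedge s v u hs).2 ⟨c, hu⟩, hsymm s c u hu, ?_⟩
  intro w hw hsw
  obtain ⟨c', hc'⟩ := (hedge s v w hs).1 hw
  have : String.singleton c' = String.singleton c := (hsymm s c' w hc').symm.trans hsw
  have hcc : c' = c := singleton_inj this
  exact hfunc (s ++ [c]) w u (hcc ▸ hc') hu

theorem no_child {pi : List (List Char × Nat)} {T : List PVVertex}
    (hedge : ∀ s v u, (s, v) ∈ pi → (u ∈ pvNxt T v ↔ ∃ c, (s ++ [c], u) ∈ pi))
    (hsymm : ∀ s c v, (s ++ [c], v) ∈ pi → pvSym T v = String.singleton c)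
    {s : List Char} {v : Nat} {c : Char}
    (hs : (s, v) ∈ pi) (hno : ∀ u, (s ++ [c], u) ∉ pi) :
    ∀ w ∈ pvNxt T v, pvSym T w ≠ String.singleton c := by
  intro w hw hsw
  obtain ⟨c', hc'⟩ := (hedge s v w hs).1 hw
  have hcc : c' = c := singleton_inj ((hsymm s c' w hc').symm.trans hsw)
  exact hno w (hcc ▸ hc')


-- ---------- invariant preservation under end-marking ----------

theorem PathQ_mono {Q : List (List Char)} {q : List Char} {s : List Char}
    (h : PathQ Q s) : PathQ (Q ++ [q]) s := by
  rcases h with h | ⟨q', hq', hs, hp⟩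
  · exact Or.inl h
  · exact Or.inr ⟨q', by simp [hq'], hs, hp⟩

theorem dom_closed {pi : List (List Char × Nat)} {T : List PVVertex} {Q : List (List Char)}
    (hkeys : ∀ s v, (s, v) ∈ pi → v < T.length ∧ PathQ Q s)
    (hcover : ∀ s q, q ∈ Q → s <+: q → s ≠ [] → ∃ v, (s, v) ∈ pi)
    {s : List Char} {v : Nat} (hs : (s, v) ∈ pi) {s' : List Char}
    (hp : s' <+: s) (hne : s' ≠ []) : ∃ u, (s', u) ∈ pi := by
  rcases (hkeys s v hs).2 with h | ⟨q, hq, _, hsq⟩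
  · subst h
    exact absurd (List.prefix_nil.mp hp) hne
  · exact hcover s' q hq (hp.trans hsq) hne

-- marking an already-marked node (or the root) changes nothing the invariant sees
theorem TInv_setEnd_triv {T : List PVVertex} {pi : List (List Char × Nat)}
    {Q : List (List Char)} (hI : TInv T pi Q) {k : Nat}
    (hk : k = 0 ∨ pvFin T k = true) : TInv (pvSetEnd T k) pi Q := by
  refine ⟨hI.root, ?_, hI.cover, hI.inj, hI.func, ?_, ?_, ?_, ?_, ?_⟩
  · intro s v hs
    simpa [pvLen_setEnd] using hI.keys s v hs
  · intro s v u hs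
    simpa [pvNxt_setEnd] using hI.edge s v u hs
  · intro s ch v hs
    simpa [pvSym_setEnd] using hI.symm s ch v hs
  · intro s v hs hne
    rw [pvFin_setEnd]
    split
    · rename_i hkv
      rcases hk with h0 | hfin
      · exfalso
        have : s = [] := hI.inj s [] v hs (by rw [← hkv.1, h0] at hs ⊢; exact (h0 ▸ hI.root))
        exact hne this
      · rw [hkv.1] at hfin
        simpa [hfin] using hI.fin_iff s v hs hne
    · exact hI.fin_iff s v hs hne
  · intro s v hs hne hnxt
    rw [pvFin_setEnd]
    split
    · rfl
    · exact hI.leaf s v hs hne (by simpa [pvNxt_setEnd] using hnxt)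
  · intro hlen
    rw [pvLen_setEnd] at hlen ⊢
    rw [pvFin_setEnd]
    split
    · rfl
    · exact hI.last hlen

-- marking the node of a fully-shared pattern cs records cs as a new pattern
theorem TInv_markFull {T : List PVVertex} {pi : List (List Char × Nat)}
    {Q : List (List Char)} (hI : TInv T pi Q) {cs : List Char} {u : Nat}
    (hu : (cs, u) ∈ pi) (hne : cs ≠ []) : TInv (pvSetEnd T u) pi (Q ++ [cs]) := by
  have hult : u < T.length := (hI.keys cs u hu).1
  refine ⟨hI.root, ?_, ?_, hI.inj, hI.func, ?_, ?_, ?_, ?_, ?_⟩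
  · intro s v hs
    exact ⟨by simpa [pvLen_setEnd] using (hI.keys s v hs).1, PathQ_mono (hI.keys s v hs).2⟩
  · intro s q hq hp hsne
    rcases List.mem_append.mp hq with hq | hq
    · exact hI.cover s q hq hp hsne
    · have : q = cs := by simpa using hq
      subst this
      exact dom_closed hI.keys hI.cover hu hp hsne
  · intro s v w hs
    simpa [pvNxt_setEnd] using hI.edge s v w hs
  · intro s ch v hs
    simpa [pvSym_setEnd] using hI.symm s ch v hs
  · intro s v hs hsne
    rw [pvFin_setEnd]
    split
    · rename_i hkv
      have : s = cs := hI.inj s cs v hs (hkv.1 ▸ hu)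
      subst this
      simp
    · rename_i hkv
      have hsc : s ≠ cs := by
        intro h
        subst h
        exact hkv ⟨(hI.func s u v hu hs).symm ▸ rfl, hult⟩
      rw [hI.fin_iff s v hs hsne]
      simp [hsc]
  · intro s v hs hsne hnxt
    rw [pvFin_setEnd]
    split
    · rfl
    · exact hI.leaf s v hs hsne (by simpa [pvNxt_setEnd] using hnxt)
  · intro hlen
    rw [pvLen_setEnd] at hlen ⊢
    rw [pvFin_setEnd]
    split
    · rfl
    · exact hI.last hlen

-- ---------- one step of the pattern walk while the path is still shared ----------

theorem sharedStep {T : List PVVertex} {pi : List (List Char × Nat)}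
    (hfunc : ∀ s v₁ v₂, (s, v₁) ∈ pi → (s, v₂) ∈ pi → v₁ = v₂)
    (hedge : ∀ s v u, (s, v) ∈ pi → (u ∈ pvNxt T v ↔ ∃ c, (s ++ [c], u) ∈ pi))
    (hsymm : ∀ s c v, (s ++ [c], v) ∈ pi → pvSym T v = String.singleton c)
    {cs : List Char} {i : Nat} (hlen : i < cs.length) {v u count : Nat}
    (hs : (cs.take i, v) ∈ pi) (hu : (cs.take (i + 1), u) ∈ pi) :
    pvIStep cs (T, count, v, v) i =
      ((if i + 1 = cs.length then pvSetEnd T u else T), count, u, u) := by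
  have hc : cs.getD i ' ' = cs[i] := List.getD_eq_getElem cs ' ' hlen
  have htake : cs.take (i + 1) = cs.take i ++ [cs[i]] := List.take_succ_eq_append_getElem hlen
  have hu' : (cs.take i ++ [cs[i]], u) ∈ pi := htake ▸ hu
  obtain ⟨hmem, hsym, huni⟩ := child_unique hfunc hedge hsymm hs hu'
  unfold pvIStep
  dsimp only
  rw [hc]
  rw [bfold_found ((i + 1) == cs.length) (String.singleton cs[i]) T v v u _ hmem hsym huni]
  by_cases hE : i + 1 = cs.length
  · simp [hE]
  · simp [hE]

theorem snoc_inj {α : Type} {s t : List α} {a b : α} (h : s ++ [a] = t ++ [b]) :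
    s = t ∧ a = b := by
  have := List.append_inj' h rfl
  exact ⟨this.1, by simpa using this.2⟩

-- ---------- one step of the walk when the next character falls off the trie ----------
-- (covers both the first fall-off from TInv and every later chain step from CInv)

theorem insertCase {T : List PVVertex} {pi : List (List Char × Nat)} {Q : List (List Char)}
    {cs : List Char} {i v : Nat}
    (hroot : ([], 0) ∈ pi)
    (hinj : ∀ s₁ s₂ u, (s₁, u) ∈ pi → (s₂, u) ∈ pi → s₁ = s₂)
    (hfunc : ∀ s v₁ v₂, (s, v₁) ∈ pi → (s, v₂) ∈ pi → v₁ = v₂)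
    (hedge : ∀ s u w, (s, u) ∈ pi → (w ∈ pvNxt T u ↔ ∃ c, (s ++ [c], w) ∈ pi))
    (hsymm : ∀ s c u, (s ++ [c], u) ∈ pi → pvSym T u = String.singleton c)
    (hfin : ∀ s u, (s, u) ∈ pi → s ≠ [] → (pvFin T u = true ↔ s ∈ Q))
    (hkeysG : ∀ s u, (s, u) ∈ pi → u < T.length ∧ (PathQ Q s ∨ (s ≠ [] ∧ s <+: cs ∧ s.length ≤ i)))
    (hcover : ∀ s q, q ∈ Q → s <+: q → s ≠ [] → ∃ u, (s, u) ∈ pi)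
    (hjcov : ∀ j, 0 < j → j ≤ i → ∃ u, (cs.take j, u) ∈ pi)
    (hleafG : ∀ s u, (s, u) ∈ pi → s ≠ [] → u ≠ v → pvNxt T u = [] → pvFin T u = true)
    (hnotdom : ∀ q ∈ Q, ¬ cs.take (i + 1) <+: q)
    (hs : (cs.take i, v) ∈ pi) (hvlt : v < T.length)
    (hnochild : ∀ u, (cs.take (i + 1), u) ∉ pi)
    (hi : i < cs.length) :
    pvIStep cs (T, T.length - 1, v, v) i =
        (pvAddNext (T ++ [⟨[], false, String.singleton cs[i]⟩]) v T.length,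
          T.length, T.length, T.length) ∧
      CInv (pvAddNext (T ++ [⟨[], false, String.singleton cs[i]⟩]) v T.length)
        (pi ++ [(cs.take (i + 1), T.length)]) Q cs (i + 1) := by
  have hc : cs.getD i ' ' = cs[i] := List.getD_eq_getElem cs ' ' hi
  have htake : cs.take (i + 1) = cs.take i ++ [cs[i]] := List.take_succ_eq_append_getElem hi
  have htklen : (cs.take (i + 1)).length = i + 1 := by
    rw [List.length_take]; omega
  have htkne : cs.take (i + 1) ≠ [] := by
    intro h; rw [h] at htklen; simp at htklen
  set k := T.length with hk
  set c := String.singleton cs[i] with hcdef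
  set T3 := pvAddNext (T ++ [⟨[], false, c⟩]) v k with hT3
  set pi' := pi ++ [(cs.take (i + 1), k)] with hpi'
  have hlen3 : T3.length = k + 1 := pvLen_ins T v k c
  have hnxt3 : ∀ w, pvNxt T3 w = if w = v then pvNxt T v ++ [k] else if w = k then [] else pvNxt T w :=
    fun w => pvNxt_ins T v k w c hvlt
  have hsym3 : ∀ w, pvSym T3 w = if w = k then c else pvSym T w :=
    fun w => pvSym_ins T v k w c hvlt
  have hfin3 : ∀ w, pvFin T3 w = if w = k then false else pvFin T w :=
    fun w => pvFin_ins T v k w c hvlt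
  have hmem' : ∀ s u, (s, u) ∈ pi' ↔ (s, u) ∈ pi ∨ (s = cs.take (i + 1) ∧ u = k) := by
    intro s u
    simp [hpi', Prod.ext_iff]
  have hvk : v ≠ k := by omega
  have holdk : ∀ s u, (s, u) ∈ pi → u ≠ k := fun s u hsu => by
    have := (hkeysG s u hsu).1; omega
  constructor
  · -- evaluation of the step
    have hnos : ∀ w ∈ pvNxt T v, pvSym T w ≠ c := by
      intro w hw
      exact no_child hedge hsymm hs (fun u hu => hnochild u (htake ▸ hu)) w hw
    unfold pvIStep
    dsimp only
    rw [hc, bfold_skip ((i + 1) == cs.length) c T v v false (pvNxt T v) hnos]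
    have harith : k - 1 + 1 = k := by omega
    simp [harith]
    rw [hT3, hcdef]
  · -- the chain invariant after appending the new node
    have hnew : (cs.take (i + 1), k) ∈ pi' := by
      rw [hmem']; exact Or.inr ⟨rfl, rfl⟩
    have hstep_notdom : ∀ q ∈ Q, ¬ cs.take (i + 1) <+: q := hnotdom
    refine ⟨Nat.succ_pos i, hi, by rw [hmem']; exact Or.inl hroot, ?_, ?_, ?_, ?_, ?_, ?_, ?_, ?_, ?_, ?_, ?_, ?_, ?_⟩
    · -- keys
      intro s u hsu
      rcases (hmem' s u).1 hsu with h | ⟨h1, h2⟩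
      · obtain ⟨hb, hpq⟩ := hkeysG s u h
        refine ⟨by omega, ?_⟩
        rcases hpq with h | ⟨h1, h2, h3⟩
        · exact Or.inl h
        · exact Or.inr ⟨h1, h2, by omega⟩
      · subst h1; subst h2
        exact ⟨by omega, Or.inr ⟨htkne, List.take_prefix _ _, by omega⟩⟩
    · -- cover
      intro s q hq hp hsne
      obtain ⟨u, hu⟩ := hcover s q hq hp hsne
      exact ⟨u, (hmem' s u).2 (Or.inl hu)⟩
    · -- cover2
      intro j hj0 hji
      by_cases hji' : j ≤ i
      · obtain ⟨u, hu⟩ := hjcov j hj0 hji'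
        exact ⟨u, (hmem' _ u).2 (Or.inl hu)⟩
      · have : j = i + 1 := by omega
        subst this
        exact ⟨k, hnew⟩
    · -- inj
      intro s₁ s₂ u h1 h2
      rcases (hmem' s₁ u).1 h1 with h1 | ⟨h1a, h1b⟩ <;> rcases (hmem' s₂ u).1 h2 with h2 | ⟨h2a, h2b⟩
      · exact hinj s₁ s₂ u h1 h2
      · exact absurd h2b (holdk _ _ h1)
      · exact absurd h1b (holdk _ _ h2)
      · rw [h1a, h2a]
    · -- func
      intro s v₁ v₂ h1 h2
      rcases (hmem' s v₁).1 h1 with h1 | ⟨h1a, h1b⟩ <;> rcases (hmem' s v₂).1 h2 with h2 | ⟨h2a, h2b⟩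
      · exact hfunc s v₁ v₂ h1 h2
      · exact absurd (h2a ▸ h1) (hnochild v₁)
      · exact absurd (h1a ▸ h2) (hnochild v₂)
      · rw [h1b, h2b]
    · -- edge
      intro s u w hsu
      rcases (hmem' s u).1 hsu with hold | ⟨h1, h2⟩
      · by_cases huv : u = v
        · subst huv
          have hsi : s = cs.take i := hinj s (cs.take i) u hold hs
          subst hsi
          rw [hnxt3 u, if_pos rfl]
          constructor
          · intro hw
            rcases List.mem_append.mp hw with hw | hw
            · obtain ⟨ch, hch⟩ := (hedge _ u w hs).1 hw
              exact ⟨ch, (hmem' _ w).2 (Or.inl hch)⟩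
            · have hwk : w = k := by simpa using hw
              refine ⟨cs[i], (hmem' _ w).2 (Or.inr ⟨?_, hwk⟩)⟩
              rw [htake]
          · rintro ⟨ch, hch⟩
            rcases (hmem' _ w).1 hch with hch | ⟨hch1, hch2⟩
            · exact List.mem_append.mpr (Or.inl ((hedge _ u w hs).2 ⟨ch, hch⟩))
            · subst hch2
              simp
        · rw [hnxt3 u, if_neg huv, if_neg (holdk _ _ hold)]
          rw [hedge s u w hold]
          constructor
          · rintro ⟨ch, hch⟩
            exact ⟨ch, (hmem' _ w).2 (Or.inl hch)⟩
          · rintro ⟨ch, hch⟩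
            rcases (hmem' _ w).1 hch with hch | ⟨hch1, hch2⟩
            · exact ⟨ch, hch⟩
            · exfalso
              rw [htake] at hch1
              obtain ⟨hse, -⟩ := snoc_inj hch1
              exact huv (hfunc _ u v (hse ▸ hold) hs)
      · subst h2
        have hsn : s = cs.take (i + 1) := h1
        subst hsn
        rw [hnxt3 k, if_neg (Ne.symm hvk), if_pos rfl]
        constructor
        · intro hw
          cases hw
        · rintro ⟨ch, hch⟩
          exfalso
          rcases (hmem' _ w).1 hch with hch | ⟨hch1, -⟩
          · obtain ⟨-, hpq⟩ := hkeysG _ w hch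
            rcases hpq with (hnil | ⟨q, hq, hne2, hpfx⟩) | ⟨hne2, hpfx, hlen2⟩
            · simp at hnil
            · exact hstep_notdom q hq ((List.prefix_append _ _).trans hpfx)
            · rw [List.length_append, htklen] at hlen2
              simp at hlen2
          · have := congrArg List.length hch1
            simp at this
    · -- symm
      intro s ch u hsu
      rcases (hmem' _ u).1 hsu with hold | ⟨h1, h2⟩
      · rw [hsym3 u, if_neg (holdk _ _ hold)]
        exact hsymm s ch u hold
      · subst h2
        rw [hsym3 k, if_pos rfl, hcdef]
        rw [htake] at h1
        obtain ⟨-, hch⟩ := snoc_inj h1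
        rw [hch]
    · -- fin_iff
      intro s u hsu hsne
      rcases (hmem' s u).1 hsu with hold | ⟨h1, h2⟩
      · rw [hfin3 u, if_neg (holdk _ _ hold)]
        exact hfin s u hold hsne
      · subst h1; subst h2
        rw [hfin3 k, if_pos rfl]
        constructor
        · intro h; cases h
        · intro hq
          exact absurd (List.prefix_refl _) (hstep_notdom _ hq)
    · -- leaf (tip exempt)
      intro s u hsu hsne hutip hnxt
      have hutk : u ≠ k := by
        rw [hlen3] at hutip; omega
      rcases (hmem' s u).1 hsu with hold | ⟨h1, h2⟩
      · rw [hfin3 u, if_neg hutk]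
        by_cases huv : u = v
        · exfalso
          subst huv
          rw [hnxt3 u, if_pos rfl] at hnxt
          simp at hnxt
        · rw [hnxt3 u, if_neg huv, if_neg hutk] at hnxt
          exact hleafG s u hold hsne huv hnxt
      · exact absurd h2 hutk
    · -- tip
      rw [hlen3]
      simpa using hnew
    · -- tipnxt
      rw [hlen3]
      simp only [Nat.add_sub_cancel]
      rw [hnxt3 k, if_neg (Ne.symm hvk), if_pos rfl]
    · -- tiplen
      rw [hlen3]; omega
    · -- notdom
      exact hstep_notdom

-- ---------- finishing a pattern: mark the tip, back to the plain invariant ----------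

theorem finalMark {T : List PVVertex} {pi : List (List Char × Nat)} {Q : List (List Char)}
    {cs : List Char} (hC : CInv T pi Q cs cs.length) :
    TInv (pvSetEnd T (T.length - 1)) pi (Q ++ [cs]) := by
  have htip : (cs, T.length - 1) ∈ pi := by simpa [List.take_length] using hC.tip
  have htlt : T.length - 1 < T.length := by have := hC.tiplen; omega
  have hcsne : cs ≠ [] := by
    intro h
    have h1 := hC.hipos
    rw [h] at h1
    simp at h1
  refine ⟨hC.root, ?_, ?_, hC.inj, hC.func, ?_, ?_, ?_, ?_, ?_⟩
  · intro s v hs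
    obtain ⟨hb, hpq⟩ := hC.keys s v hs
    refine ⟨by simpa [pvLen_setEnd] using hb, ?_⟩
    rcases hpq with h | ⟨h1, h2, -⟩
    · exact PathQ_mono h
    · exact Or.inr ⟨cs, by simp, h1, h2⟩
  · intro s q hq hp hsne
    rcases List.mem_append.mp hq with hq | hq
    · exact hC.cover s q hq hp hsne
    · have hqc : q = cs := by simpa using hq
      rw [hqc] at hp
      have hsl : s = cs.take s.length := List.prefix_iff_eq_take.mp hp
      have h0 : 0 < s.length := List.length_pos_of_ne_nil hsne
      have h1 : s.length ≤ cs.length := hp.length_le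
      obtain ⟨v, hv⟩ := hC.cover2 s.length h0 h1
      exact ⟨v, hsl ▸ hv⟩
  · intro s v u hs
    simpa [pvNxt_setEnd] using hC.edge s v u hs
  · intro s ch v hs
    simpa [pvSym_setEnd] using hC.symm s ch v hs
  · intro s v hs hsne
    rw [pvFin_setEnd]
    split
    · rename_i hcond
      have : s = cs := hC.inj s cs v hs (hcond.1 ▸ htip)
      subst this
      simp
    · rename_i hcond
      have hvt : v ≠ T.length - 1 := by
        intro h
        exact hcond ⟨h.symm, htlt⟩
      have hsc : s ≠ cs := by
        intro h
        subst h
        exact hvt (hC.func s v (T.length - 1) hs htip)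
      rw [hC.fin_iff s v hs hsne]
      simp [hsc]
  · intro s v hs hsne hnxt
    rw [pvFin_setEnd]
    split
    · rfl
    · rename_i hcond
      have hvt : v ≠ T.length - 1 := fun h => hcond ⟨h.symm, htlt⟩
      exact hC.leaf s v hs hsne hvt (by simpa [pvNxt_setEnd] using hnxt)
  · intro hlen
    rw [pvLen_setEnd] at hlen ⊢
    rw [pvFin_setEnd]
    simp [htlt]

-- ---------- the chain phase: every remaining character appends a fresh node ----------

theorem chainFold {Q : List (List Char)} {cs : List Char} :
    ∀ (m i : Nat) (T : List PVVertex) (pi : List (List Char × Nat)),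
      CInv T pi Q cs i → i + m = cs.length →
      ∃ T' pi',
        (List.range' i m).foldl (pvIStep cs) (T, T.length - 1, T.length - 1, T.length - 1) =
          (T', T'.length - 1, T'.length - 1, T'.length - 1) ∧
        CInv T' pi' Q cs cs.length := by
  intro m
  induction m with
  | zero =>
    intro i T pi hC harith
    refine ⟨T, pi, rfl, ?_⟩
    have : i = cs.length := by omega
    exact this ▸ hC
  | succ m ih =>
    intro i T pi hC harith
    have hi : i < cs.length := by omega
    have htklen : (cs.take (i + 1)).length = i + 1 := by rw [List.length_take]; omega
    have htkne : cs.take (i + 1) ≠ [] := by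
      intro h; rw [h] at htklen; simp at htklen
    have htlt : T.length - 1 < T.length := by have := hC.tiplen; omega
    have hnotdom : ∀ q ∈ Q, ¬ cs.take (i + 1) <+: q := by
      intro q hq hp
      exact hC.notdom q hq ((List.take_prefix_take_left (by omega)).trans hp)
    have hnochild : ∀ u, (cs.take (i + 1), u) ∉ pi := by
      intro u hu
      obtain ⟨-, hpq⟩ := hC.keys _ u hu
      rcases hpq with (hnil | ⟨q, hq, -, hpfx⟩) | ⟨-, -, hlen2⟩
      · exact htkne hnil
      · exact hnotdom q hq hpfx
      · omega
    obtain ⟨hstep, hC'⟩ := insertCase hC.root hC.inj hC.func hC.edge hC.symm hC.fin_iff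
      hC.keys hC.cover hC.cover2 hC.leaf hnotdom hC.tip htlt hnochild hi
    rw [List.range'_succ, List.foldl_cons, hstep]
    set T3 := pvAddNext (T ++ [⟨[], false, String.singleton cs[i]⟩]) (T.length - 1) T.length with hT3
    have hlen3 : T3.length = T.length + 1 := pvLen_ins _ _ _ _
    obtain ⟨T', pi', hfold, hCfin⟩ := ih (i + 1) T3 _ hC' (by omega)
    refine ⟨T', pi', ?_, hCfin⟩
    have harr : T.length = T3.length - 1 := by omega
    rw [harr]
    exact hfold

-- ---------- the whole walk for one pattern ----------

theorem walk {Q : List (List Char)} {cs : List Char} :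
    ∀ (m i v : Nat) (T : List PVVertex) (pi : List (List Char × Nat)),
      TInv T pi Q → (cs.take i, v) ∈ pi → i + m = cs.length → 1 ≤ m →
      ∃ T' pi' j,
        (List.range' i m).foldl (pvIStep cs) (T, T.length - 1, v, v) =
          (T', T'.length - 1, j, j) ∧
        TInv (pvSetEnd T' (T'.length - 1)) pi' (Q ++ [cs]) := by
  intro m
  induction m with
  | zero => omega
  | succ m ih =>
    intro i v T pi hI hs harith hm1
    have hi : i < cs.length := by omega
    have htklen : (cs.take (i + 1)).length = i + 1 := by rw [List.length_take]; omega
    have htkne : cs.take (i + 1) ≠ [] := by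
      intro h; rw [h] at htklen; simp at htklen
    have hvlt : v < T.length := (hI.keys _ v hs).1
    by_cases hch : ∃ u, (cs.take (i + 1), u) ∈ pi
    · obtain ⟨u, hu⟩ := hch
      have hstep := sharedStep hI.func hI.edge hI.symm hi hs hu (count := T.length - 1)
      rw [List.range'_succ, List.foldl_cons, hstep]
      cases m with
      | zero =>
        have hE : i + 1 = cs.length := by omega
        rw [if_pos hE]
        refine ⟨pvSetEnd T u, pi, u, by simp [pvLen_setEnd], ?_⟩
        have hcs : (cs, u) ∈ pi := by
          rw [← List.take_length (l := cs), ← hE]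
          exact hu
        have hcsne : cs ≠ [] := by
          intro h; rw [h] at hE; simp at hE
        have hI' : TInv (pvSetEnd T u) pi (Q ++ [cs]) := TInv_markFull hI hcs hcsne
        apply TInv_setEnd_triv hI'
        rw [pvLen_setEnd]
        by_cases h1 : 1 < T.length
        · refine Or.inr ?_
          have h2 := hI'.last (by simpa [pvLen_setEnd] using h1)
          simpa [pvLen_setEnd] using h2
        · exact Or.inl (by omega)
      | succ m' =>
        have hE : ¬ (i + 1 = cs.length) := by omega
        rw [if_neg hE]
        exact ih (i + 1) u T pi hI hu (by omega) (by omega)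
    · -- first fall-off: switch to the chain phase
      have hnochild : ∀ u, (cs.take (i + 1), u) ∉ pi := by
        intro u hu; exact hch ⟨u, hu⟩
      have hnotdom : ∀ q ∈ Q, ¬ cs.take (i + 1) <+: q := by
        intro q hq hp
        obtain ⟨u, hu⟩ := hI.cover _ q hq hp htkne
        exact hnochild u hu
      have hjcov : ∀ j, 0 < j → j ≤ i → ∃ u, (cs.take j, u) ∈ pi := by
        intro j hj0 hji
        have htkjne : cs.take j ≠ [] := by
          intro h
          have : (cs.take j).length = j := by rw [List.length_take]; omega
          rw [h] at this; simp at this; omega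
        exact dom_closed hI.keys hI.cover hs (List.take_prefix_take_left hji) htkjne
      have hkeysG : ∀ s u, (s, u) ∈ pi →
          u < T.length ∧ (PathQ Q s ∨ (s ≠ [] ∧ s <+: cs ∧ s.length ≤ i)) := by
        intro s u hsu
        exact ⟨(hI.keys s u hsu).1, Or.inl (hI.keys s u hsu).2⟩
      have hleafG : ∀ s u, (s, u) ∈ pi → s ≠ [] → u ≠ v → pvNxt T u = [] → pvFin T u = true :=
        fun s u hsu hsne _ => hI.leaf s u hsu hsne
      obtain ⟨hstep, hC⟩ := insertCase hI.root hI.inj hI.func hI.edge hI.symm hI.fin_iff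
        hkeysG hI.cover hjcov hleafG hnotdom hs hvlt hnochild hi
      rw [List.range'_succ, List.foldl_cons, hstep]
      set T3 := pvAddNext (T ++ [⟨[], false, String.singleton cs[i]⟩]) v T.length with hT3
      have hlen3 : T3.length = T.length + 1 := pvLen_ins _ _ _ _
      obtain ⟨T', pi', hfold, hCfin⟩ := chainFold m (i + 1) T3 _ hC (by omega)
      refine ⟨T', pi', T'.length - 1, ?_, finalMark hCfin⟩
      have harr : T.length = T3.length - 1 := by omega
      rw [harr]
      exact hfold

-- Q with an empty pattern appended is the same invariant
theorem TInv_append_nil {T : List PVVertex} {pi : List (List Char × Nat)}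
    {Q : List (List Char)} (hI : TInv T pi Q) : TInv T pi (Q ++ [[]]) := by
  refine ⟨hI.root, ?_, ?_, hI.inj, hI.func, hI.edge, hI.symm, ?_, hI.leaf, hI.last⟩
  · intro s v hs
    exact ⟨(hI.keys s v hs).1, PathQ_mono (hI.keys s v hs).2⟩
  · intro s q hq hp hsne
    rcases List.mem_append.mp hq with hq | hq
    · exact hI.cover s q hq hp hsne
    · have : q = [] := by simpa using hq
      rw [this] at hp
      exact absurd (List.prefix_nil.mp hp) hsne
  · intro s v hs hsne
    rw [hI.fin_iff s v hs hsne]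
    constructor
    · intro h; exact List.mem_append.mpr (Or.inl h)
    · intro h
      rcases List.mem_append.mp h with h | h
      · exact h
      · exact absurd (by simpa using h) hsne

-- ---------- one pattern of BuildTrie ----------

theorem insertPat {T : List PVVertex} {pi : List (List Char × Nat)} {Q : List (List Char)}
    (hI : TInv T pi Q) (p : String) :
    ∃ T' pi', pvInsert (T, T.length - 1) p = (T', T'.length - 1) ∧
      TInv T' pi' (Q ++ [p.toList]) := by
  by_cases hp : p.toList.length = 0
  · have hnil : p.toList = [] := List.eq_nil_of_length_eq_zero hp
    refine ⟨pvSetEnd T (T.length - 1), pi, ?_, ?_⟩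
    · unfold pvInsert
      dsimp only
      rw [hp]
      simp [pvLen_setEnd]
    · rw [hnil]
      apply TInv_append_nil
      apply TInv_setEnd_triv hI
      by_cases h1 : 1 < T.length
      · exact Or.inr (hI.last h1)
      · exact Or.inl (by omega)
  · have hroot0 : (p.toList.take 0, 0) ∈ pi := by simpa using hI.root
    obtain ⟨T', pi', j, hfold, hIfin⟩ :=
      walk p.toList.length 0 0 T pi hI hroot0 (by omega) (by omega)
    refine ⟨pvSetEnd T' (T'.length - 1), pi', ?_, hIfin⟩
    unfold pvInsert
    dsimp only
    rw [List.range_eq_range', hfold]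
    simp [pvLen_setEnd]

-- ---------- the full BuildTrie ----------

theorem TInv_init : TInv [pvDefV] [([], 0)] [] := by
  have hmem : ∀ s (v : Nat), ((s, v) ∈ [(([] : List Char), 0)]) ↔ (s = [] ∧ v = 0) := by
    intro s v
    simp [Prod.ext_iff]
  refine ⟨by simp, ?_, ?_, ?_, ?_, ?_, ?_, ?_, ?_, ?_⟩
  · intro s v hs
    obtain ⟨h1, h2⟩ := (hmem s v).1 hs
    exact ⟨by simp [h2], Or.inl h1⟩
  · intro s q hq
    simp at hq
  · intro s₁ s₂ v h1 h2
    rw [((hmem _ _).1 h1).1, ((hmem _ _).1 h2).1]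
  · intro s v₁ v₂ h1 h2
    rw [((hmem _ _).1 h1).2, ((hmem _ _).1 h2).2]
  · intro s v u hs
    obtain ⟨h1, h2⟩ := (hmem s v).1 hs
    subst h1; subst h2
    constructor
    · intro h
      simp [pvNxt, pvDefV] at h
    · rintro ⟨ch, hch⟩
      obtain ⟨h, -⟩ := (hmem _ _).1 hch
      simp at h
  · intro s ch v hs
    obtain ⟨h, -⟩ := (hmem _ _).1 hs
    simp at h
  · intro s v hs hsne
    exact absurd ((hmem _ _).1 hs).1 hsne
  · intro s v hs hsne
    exact absurd ((hmem _ _).1 hs).1 hsne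
  · intro h
    simp at h

theorem buildFold :
    ∀ (ps : List String) (T : List PVVertex) (pi : List (List Char × Nat)) (Q : List (List Char)),
      TInv T pi Q →
      ∃ T' pi', ps.foldl pvInsert (T, T.length - 1) = (T', T'.length - 1) ∧
        TInv T' pi' (Q ++ ps.map String.toList) := by
  intro ps
  induction ps with
  | nil =>
    intro T pi Q hI
    exact ⟨T, pi, rfl, by simpa using hI⟩
  | cons p ps ih =>
    intro T pi Q hI
    obtain ⟨T1, pi1, hins, hI1⟩ := insertPat hI p
    obtain ⟨T', pi', hfold, hIfin⟩ := ih T1 pi1 (Q ++ [p.toList]) hI1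
    refine ⟨T', pi', ?_, by simpa using hIfin⟩
    rw [List.foldl_cons, hins, hfold]

theorem buildInv (patterns : List String) :
    ∃ pi, TInv (pvBuildTrie patterns) pi (patterns.map String.toList) := by
  obtain ⟨T', pi', hfold, hIfin⟩ := buildFold patterns [pvDefV] [([], 0)] [] TInv_init
  refine ⟨pi', ?_⟩
  have : pvBuildTrie patterns = T' := by
    unfold pvBuildTrie
    have h0 : (([pvDefV] : List PVVertex), 0) = ([pvDefV], ([pvDefV] : List PVVertex).length - 1) := by simp
    rw [h0, hfold]
  rw [this]
  simpa using hIfin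

-- ---------- Match is exact prefix search on the built trie ----------

theorem matchCorrect {T : List PVVertex} {pi : List (List Char × Nat)} {Q : List (List Char)}
    (hI : TInv T pi Q) (t : List Char) :
    ∀ (fuel idx : Nat) (s : List Char) (v : Nat), (s, v) ∈ pi → fuel + idx = t.length →
      (pvMatchLoop t T fuel idx v
          (if t.length == idx then "-1" else String.singleton (t.getD idx ' ')) = true ↔
        ∃ r, r ≠ [] ∧ r <+: t.drop idx ∧ s ++ r ∈ Q) := by
  intro fuel
  induction fuel with
  | zero =>
    intro idx s v hs harith
    have hidx : idx = t.length := by omega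
    have hP : ¬ ∃ r, r ≠ [] ∧ r <+: t.drop idx ∧ s ++ r ∈ Q := by
      rintro ⟨r, hrne, hrp, -⟩
      rw [hidx, List.drop_length] at hrp
      exact hrne (List.prefix_nil.mp hrp)
    exact iff_of_false (by simp [pvMatchLoop]) hP
  | succ fuel ih =>
    intro idx s v hs harith
    have hidx : idx < t.length := by omega
    have hne : (t.length == idx) = false := by simp; omega
    have hgd : t.getD idx ' ' = t[idx] := List.getD_eq_getElem t ' ' hidx
    have hdrop : t.drop idx = t[idx] :: t.drop (idx + 1) := List.drop_eq_getElem_cons hidx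
    rw [hne]
    simp only [Bool.false_eq_true, if_false, hgd]
    by_cases hch : ∃ u, (s ++ [t[idx]], u) ∈ pi
    · obtain ⟨u, hu⟩ := hch
      obtain ⟨hmem, hsym, huni⟩ := child_unique hI.func hI.edge hI.symm hs hu
      have hscan := scan_found (String.singleton t[idx]) T u (pvNxt T v) hmem hsym huni
      by_cases hfinu : pvFin T u = true
      · have hcond : ((pvNxt T u).length == 0 || pvFin T u) = true := by simp [hfinu]
        rw [pvMatchLoop, hscan, hcond]
        have hQ : s ++ [t[idx]] ∈ Q := (hI.fin_iff _ u hu (by simp)).1 hfinu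
        refine iff_of_true rfl ⟨[t[idx]], by simp, ?_, hQ⟩
        rw [hdrop]
        exact ⟨t.drop (idx + 1), rfl⟩
      · have hnxtne : pvNxt T u ≠ [] := by
          intro h
          exact hfinu (hI.leaf _ u hu (by simp) h)
        have hcond : ((pvNxt T u).length == 0 || pvFin T u) = false := by
          have : (pvNxt T u).length ≠ 0 := fun h => hnxtne (List.eq_nil_of_length_eq_zero h)
          simp [hfinu, this]
        rw [pvMatchLoop, hscan, hcond]
        simp only [Bool.false_eq_true, if_false]
        rw [ih (idx + 1) (s ++ [t[idx]]) u hu (by omega)]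
        constructor
        · rintro ⟨r', hrne', hrp', hrq'⟩
          exact ⟨t[idx] :: r', by simp, by rw [hdrop]; exact List.cons_prefix_cons.mpr ⟨rfl, hrp'⟩,
            by simpa using hrq'⟩
        · rintro ⟨r, hrne, hrp, hrq⟩
          obtain ⟨r₁, r₂, rfl⟩ : ∃ r₁ r₂, r = r₁ :: r₂ := by
            cases r with
            | nil => exact absurd rfl hrne
            | cons a b => exact ⟨a, b, rfl⟩
          rw [hdrop] at hrp
          obtain ⟨hr1, hr2⟩ := List.cons_prefix_cons.mp hrp
          subst hr1
          refine ⟨r₂, ?_, hr2, by simpa using hrq⟩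
          intro hr2nil
          subst hr2nil
          exact hfinu ((hI.fin_iff _ u hu (by simp)).2 (by simpa using hrq))
    · have hnos := no_child hI.edge hI.symm hs (fun u hu => hch ⟨u, hu⟩)
      have hP : ¬ ∃ r, r ≠ [] ∧ r <+: t.drop idx ∧ s ++ r ∈ Q := by
        rintro ⟨r, hrne, hrp, hrq⟩
        obtain ⟨r₁, r₂, rfl⟩ : ∃ r₁ r₂, r = r₁ :: r₂ := by
          cases r with
          | nil => exact absurd rfl hrne
          | cons a b => exact ⟨a, b, rfl⟩
        rw [hdrop] at hrp
        obtain ⟨hr1, -⟩ := List.cons_prefix_cons.mp hrp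
        subst hr1
        have hpfx : s ++ [t[idx]] <+: s ++ t[idx] :: r₂ := ⟨r₂, by simp⟩
        obtain ⟨u, hu⟩ := hI.cover (s ++ [t[idx]]) (s ++ t[idx] :: r₂) hrq hpfx (by simp)
        exact hch ⟨u, hu⟩
      refine iff_of_false ?_ hP
      rw [pvMatchLoop, scan_none _ _ _ hnos]
      simp

theorem matchTop {T : List PVVertex} {pi : List (List Char × Nat)} {Q : List (List Char)}
    (hI : TInv T pi Q) (t : List Char) (htne : t ≠ []) :
    (pvMatch t T = true ↔ ∃ r, r ≠ [] ∧ r <+: t ∧ r ∈ Q) := by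
  have hpos : 0 < t.length := List.length_pos_of_ne_nil htne
  have h0 : (t.length == 0) = false := by simp; omega
  have := matchCorrect hI t t.length 0 [] 0 hI.root (by omega)
  rw [h0] at this
  simp only [Bool.false_eq_true, if_false, List.drop_zero, List.nil_append] at this
  exact this

-- ---------- B's predicate computes the same prefix condition ----------

theorem anyBridge (ps : List String) (u : List Char) :
    ((ps.any fun p => decide (p ≠ "") && p.toList.isPrefixOf u) = true ↔
      ∃ r, r ≠ [] ∧ r <+: u ∧ r ∈ ps.map String.toList) := by
  simp only [List.any_eq_true, Bool.and_eq_true, decide_eq_true_eq, List.isPrefixOf_iff_prefix]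
  constructor
  · rintro ⟨p, hp, hpne, hpfx⟩
    refine ⟨p.toList, ?_, hpfx, List.mem_map.mpr ⟨p, hp, rfl⟩⟩
    simpa [String.toList_eq_nil_iff] using hpne
  · rintro ⟨r, hrne, hrp, hrm⟩
    obtain ⟨p, hp, rfl⟩ := List.mem_map.mp hrm
    refine ⟨p, hp, ?_, hrp⟩
    simpa [String.toList_eq_nil_iff] using hrne

-- ---------- the outer loop of Solve versus B's filtered range ----------

theorem loopEq {T : List PVVertex} {pi : List (List Char × Nat)} (patterns : List String)
    (hI : TInv T pi (patterns.map String.toList)) (L : List Char) :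
    ∀ (m k : Nat), k + m = L.length →
      pvSolveLoop T (L.drop k) (k : Int) =
        ((List.range' k m).filter
            (fun i => patterns.any fun p => decide (p ≠ "") && p.toList.isPrefixOf (L.drop i))).map
          (fun i => (i : Int)) := by
  intro m
  induction m with
  | zero =>
    intro k harith
    have hk : k = L.length := by omega
    rw [hk, List.drop_length]
    rfl
  | succ m ih =>
    intro k harith
    have hk : k < L.length := by omega
    have hdrop : L.drop k = L[k] :: L.drop (k + 1) := List.drop_eq_getElem_cons hk
    have hdne : L.drop k ≠ [] := by
      intro h
      have := congrArg List.length h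
      simp at this
      omega
    have hmatch : pvMatch (L.drop k) T =
        (patterns.any fun p => decide (p ≠ "") && p.toList.isPrefixOf (L.drop k)) := by
      apply Bool.eq_iff_iff.mpr
      rw [matchTop hI (L.drop k) hdne, anyBridge]
    have hcast : (k : Int) + 1 = ((k + 1 : Nat) : Int) := by push_cast; ring
    have hstep : pvSolveLoop T (L.drop k) (k : Int) =
        (if pvMatch (L.drop k) T = true then [(k : Int)] else []) ++
          pvSolveLoop T (L.drop (k + 1)) ((k : Int) + 1) := by
      rw [hdrop, pvSolveLoop, ← hdrop]
    rw [hstep, hmatch, hcast, ih (k + 1) (by omega), List.range'_succ, List.filter_cons]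
    by_cases hp : (patterns.any fun p => decide (p ≠ "") && p.toList.isPrefixOf (L.drop k)) = true
    · rw [hp]
      simp
    · rw [Bool.not_eq_true] at hp
      rw [hp]
      simp

-- ===== VERDICT (by name: the statement is the Claim_ definition above) =====
theorem Solve_spec : Claim_equal_Solve := by
  unfold Claim_equal_Solve
  intro text n patterns hdom
  unfold Spec_Solve
  obtain ⟨pi, hI⟩ := buildInv patterns
  have h := loopEq patterns hI text.toList text.toList.length 0 (by omega)
  rw [List.drop_zero] at h
  unfold Solve Solve_alt
  rw [List.range_eq_range']
  simpa using h
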